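-- pv_equiv track=rewrite | github.com/stsouko/CGRtools | CGRtools/algorithms/components.py | _skin_graph
-- ===== SOURCE A (Python) =====
-- from typing import List, Tuple, Dict, Set, Any, Union, TYPE_CHECKING, Iterator
--
-- def _skin_graph(bonds: Dict[int, Union[Set[int], Dict[int, Any]]]) -> Dict[int, Set[int]]:
--     """
--     Graph without terminal nodes. Only rings and linkers
--     """
--     bonds = {n: set(ms) for n, ms in bonds.items() if ms}
--     while True:  # skip not-cycle chains
--         try:
--             n = next(n for n, ms in bonds.items() if len(ms) <= 1)
--         except StopIteration:
--             break
--         for m in bonds.pop(n):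
--             bonds[m].discard(n)
--     return bonds
-- ===== SOURCE B (Python) =====
-- def _skin_graph(bonds):
--     """
--     Graph without terminal nodes. Only rings and linkers
--     """
--     adj = {n: set(ms) for n, ms in bonds.items() if ms}
--     keep = set(adj)
--     for ms in adj.values():
--         keep |= ms
--     # repeatedly drop every vertex that has fewer than two surviving neighbours;
--     # a vertex with no adjacency entry of its own is never dropped
--     while True:
--         new = {n for n in keep if n not in adj or sum(m in keep for m in adj[n]) > 1}
--         if new == keep:
--             break
--         keep = new
--     return {n: {m for m in ms if m in keep} for n, ms in adj.items() if n in keep}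
-- ===== Notes on version B (the rewrite author's own statement) =====
-- stated objective: alternative
-- what changed: A destructively pops one degree-<=1 node at a time (rescanning the whole dict for the next leaf and mutating neighbor sets in place); B never mutates the adjacency: it collects all vertices, iterates a global 'keep only vertices with at least two kept neighbours' filter to a fixpoint, and rebuilds the result dict in one pass as a restriction of the original adjacency to the kept set. Pre_ excludes directed/self-loop inputs actually reached by the pruning loop, where A may raise KeyError or return order-dependent leftovers of its destructive traversal.
-- outside the precondition, e.g. on _skin_graph({1: [2], 2: []}): A raises KeyError, B returns {}; on _skin_graph({1: [3], 2: [1, 4, 5], 3: [1]}): A returns {2: {1, 4, 5}}, B returns {2: {4, 5}}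
import Mathlib
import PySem

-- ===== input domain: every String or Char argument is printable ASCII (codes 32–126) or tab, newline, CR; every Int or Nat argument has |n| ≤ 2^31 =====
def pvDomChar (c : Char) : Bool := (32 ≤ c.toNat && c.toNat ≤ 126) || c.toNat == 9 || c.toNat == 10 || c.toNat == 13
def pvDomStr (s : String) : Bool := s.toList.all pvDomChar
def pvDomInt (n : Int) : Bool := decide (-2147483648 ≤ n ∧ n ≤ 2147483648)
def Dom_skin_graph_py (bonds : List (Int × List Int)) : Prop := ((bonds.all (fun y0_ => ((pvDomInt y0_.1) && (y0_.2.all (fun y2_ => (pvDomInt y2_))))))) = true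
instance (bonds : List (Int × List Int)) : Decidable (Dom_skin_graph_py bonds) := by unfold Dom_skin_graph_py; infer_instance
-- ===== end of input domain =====

-- B replaces A's one-leaf-at-a-time destructive pruning by a non-mutating fixpoint
-- that repeatedly drops every vertex with fewer than two surviving neighbours, then
-- rebuilds the result in one pass (objective: alternative; return value only — A also
-- consumes/mutates its local dict copy, which no caller observes).

-- ===== PORT A =====
-- shared first line of both Pythons: {n: set(ms) for n, ms in bonds.items() if ms}
def pvClean (bonds : List (Int × List Int)) : PySem.Dict Int (List Int) :=
  PySem.Dict.mk (((PySem.Dict.ofList bonds).items.filter (fun p => !p.2.isEmpty)).map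
    (fun p => (p.1, PySem.Set.ofList p.2)))

-- bonds[m].discard(n); the none branch is Python's KeyError, excluded by Pre_
def pvDiscardOne (d : PySem.Dict Int (List Int)) (n m : Int) : PySem.Dict Int (List Int) :=
  match d.get? m with
  | some s => d.insert m (PySem.Set.discard s n)
  | none => d

def pvALoop : Nat → PySem.Dict Int (List Int) → PySem.Dict Int (List Int)
  | 0, d => d
  | fuel+1, d =>
    match d.items.find? (fun p => decide (p.2.length ≤ 1)) with
    | none => d
    | some (n, ms) => pvALoop fuel (ms.foldl (fun d' m => pvDiscardOne d' n m) (d.erase n))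

def skin_graph_py (bonds : List (Int × List Int)) : List (Int × List Int) :=
  (pvALoop (pvClean bonds).size (pvClean bonds)).items

-- ===== PORT B =====
-- keep = set(adj); for ms in adj.values(): keep |= ms
def pvAllNodes (adj : PySem.Dict Int (List Int)) : PySem.Set Int :=
  adj.values.foldl (fun k ms => PySem.Set.union k ms) adj.keys

-- while True: new = {n for n in keep if n not in adj or sum(m in keep for m in adj[n]) > 1} …
def pvBLoop : Nat → PySem.Dict Int (List Int) → PySem.Set Int → PySem.Set Int
  | 0, _, keep => keep
  | fuel+1, adj, keep =>
    let nw := keep.filter (fun n =>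
      !(adj.contains n) || decide (1 < (adj.getD n []).countP (fun m => keep.contains m)))
    if PySem.Set.equal nw keep then keep else pvBLoop fuel adj nw

def skin_graph_py_alt (bonds : List (Int × List Int)) : List (Int × List Int) :=
  let adj := pvClean bonds
  let keep := pvBLoop ((pvAllNodes adj).length + 1) adj (pvAllNodes adj)
  (adj.items.filter (fun p => keep.contains p.1)).map
    (fun p => (p.1, p.2.filter (fun m => keep.contains m)))

-- ===== PRECONDITION & SPEC =====
-- Pre_ admits (a) undirected simple graphs (symmetric adjacency, no self-loops among
-- the nonempty entries) — the class this molecular-graph helper is written for — and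
-- (b) any input whose every nonempty entry already has two distinct neighbors, so the
-- pruning loop never fires.  Excluded are directed/self-loop inputs actually reached
-- by the pruning loop: there A may raise KeyError (it looks up a neighbor whose entry
-- is already gone), and whether it does — and what survives when it does not — depends
-- on which entry is still present when a leaf is popped, an artefact of the
-- destructive one-at-a-time traversal.
def Pre_skin_graph_py (bonds : List (Int × List Int)) : Prop :=
  (∀ p ∈ (PySem.Dict.ofList bonds).items, p.2 ≠ [] →
    p.1 ∉ p.2 ∧ ∀ m ∈ p.2, p.1 ∈ (PySem.Dict.ofList bonds).getD m [])
  ∨ (∀ p ∈ (PySem.Dict.ofList bonds).items, p.2 ≠ [] → 2 ≤ (PySem.Set.ofList p.2).length)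

instance (bonds : List (Int × List Int)) : Decidable (Pre_skin_graph_py bonds) := by
  unfold Pre_skin_graph_py; infer_instance

def pvWitness_skin_graph_py : (List (Int × List Int)) :=
  [(1, [2, 3]), (2, [1, 3]), (3, [1, 2]), (4, []), (5, [6]), (6, [5])]

def Spec_skin_graph_py (bonds : List (Int × List Int)) (out : List (Int × List Int)) : Prop := out = skin_graph_py_alt bonds
instance (bonds : List (Int × List Int)) (out : List (Int × List Int)) : Decidable (Spec_skin_graph_py bonds out) := by unfold Spec_skin_graph_py; infer_instance

-- ===== CLAIM (what is proved, stated in full; the proofs are below) =====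
def Claim_equal_skin_graph_py : Prop := ∀ (bonds : List (Int × List Int)), Dom_skin_graph_py bonds → Pre_skin_graph_py bonds → Spec_skin_graph_py bonds (skin_graph_py bonds)

-- ===== LEMMAS AND PROOFS =====

-- restriction of an adjacency item list to a node set K
def vmask (K : List Int) (p : Int × List Int) : Int × List Int :=
  (p.1, p.2.filter (fun m => decide (m ∈ K)))

def rstr (L : List (Int × List Int)) (K : List Int) : List (Int × List Int) :=
  (L.filter (fun p => decide (p.1 ∈ K))).map (vmask K)

-- J is a 'good' node set: every member has ≥ 2 neighbors inside J
def Good (L : List (Int × List Int)) (J : List Int) : Prop :=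
  ∀ n ∈ J, ∃ p, p ∈ L ∧ p.1 = n ∧ 2 ≤ p.2.countP (fun m => decide (m ∈ J))

theorem good_subset_keys {L : List (Int × List Int)} {J : List Int} (h : Good L J) :
    ∀ n ∈ J, n ∈ L.map Prod.fst := by
  intro n hn
  obtain ⟨p, hp, hp1, -⟩ := h n hn
  exact List.mem_map.mpr ⟨p, hp, hp1⟩

theorem entry_unique {L : List (Int × List Int)} (hnd : (L.map Prod.fst).Nodup)
    {p q : Int × List Int} (hp : p ∈ L) (hq : q ∈ L) (h : p.1 = q.1) : p = q := by
  have := List.inj_on_of_nodup_map hnd hp hq h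
  exact this

theorem contains_eq_decide_mem (keep : List Int) (m : Int) :
    keep.contains m = decide (m ∈ keep) := by
  by_cases h : m ∈ keep <;> simp [h]

theorem beq_eq_decide_int (a b : Int) : (a == b) = decide (a = b) := by
  by_cases h : a = b <;> simp [h]

-- two sublists of a duplicate-free list with the same members are equal
theorem sublist_eq_of_mem_iff : ∀ {base K1 K2 : List Int}, K1.Sublist base → K2.Sublist base →
    base.Nodup → (∀ x, x ∈ K1 ↔ x ∈ K2) → K1 = K2 := by
  intro base
  induction base with
  | nil =>
    intro K1 K2 h1 h2 _ _
    rw [List.sublist_nil] at h1 h2; rw [h1, h2]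
  | cons b bs ih =>
    intro K1 K2 h1 h2 hnd hmem
    have hb : b ∉ bs := (List.nodup_cons.mp hnd).1
    have hnd' : bs.Nodup := (List.nodup_cons.mp hnd).2
    rcases List.sublist_cons_iff.mp h1 with h1' | ⟨r1, rfl, h1'⟩
    · rcases List.sublist_cons_iff.mp h2 with h2' | ⟨r2, rfl, h2'⟩
      · exact ih h1' h2' hnd' hmem
      · exact absurd (h1'.subset ((hmem b).mpr (List.mem_cons_self))) hb
    · rcases List.sublist_cons_iff.mp h2 with h2' | ⟨r2, rfl, h2'⟩
      · exact absurd (h2'.subset ((hmem b).mp (List.mem_cons_self))) hb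
      · have hbr1 : b ∉ r1 := fun h => hb (h1'.subset h)
        have hbr2 : b ∉ r2 := fun h => hb (h2'.subset h)
        have : r1 = r2 := by
          refine ih h1' h2' hnd' (fun x => ⟨fun hx => ?_, fun hx => ?_⟩)
          · rcases List.mem_cons.mp ((hmem x).mp (List.mem_cons_of_mem _ hx)) with rfl | h
            · exact absurd hx hbr1
            · exact h
          · rcases List.mem_cons.mp ((hmem x).mpr (List.mem_cons_of_mem _ hx)) with rfl | h
            · exact absurd hx hbr2
            · exact h
        rw [this]

-- discard twice = discard once
theorem discard_discard (v : List Int) (n : Int) :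
    PySem.Set.discard (PySem.Set.discard v n) n = PySem.Set.discard v n := by
  simp [PySem.Set.discard, List.filter_filter]

-- a single bonds[m].discard(n) rewrites exactly the m-entry of the item list
theorem discardOne_items (E : PySem.Dict Int (List Int)) (n m : Int)
    (hnd : E.keys.Nodup) (hc : E.contains m = true) :
    (pvDiscardOne E n m).items
      = E.items.map (fun p => if p.1 = m then (p.1, PySem.Set.discard p.2 n) else p) := by
  have hsome : ∃ s, E.get? m = some s := by
    rw [PySem.Dict.contains_eq_isSome_get?] at hc
    exact Option.isSome_iff_exists.mp hc
  obtain ⟨s, hs⟩ := hsome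
  have : pvDiscardOne E n m = E.insert m (PySem.Set.discard s n) := by
    unfold pvDiscardOne; rw [hs]
  rw [this, PySem.Dict.items_insert_of_contains E _ hc]
  refine List.map_congr_left (fun p hp => ?_)
  have hget : E.get? p.1 = some p.2 := PySem.Dict.get?_of_mem_items E hp hnd
  by_cases h : p.1 = m
  · subst h
    rw [hs] at hget
    simp [Option.some.inj hget]
  · simp [h]

-- the whole 'for m in bonds.pop(n)' loop as one map over the items
theorem foldl_discard_items (n : Int) : ∀ (ms : List Int) (E : PySem.Dict Int (List Int)),
    E.keys.Nodup → (∀ m ∈ ms, E.contains m = true) →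
    (ms.foldl (fun d' m => pvDiscardOne d' n m) E).items
      = E.items.map (fun p => if p.1 ∈ ms then (p.1, PySem.Set.discard p.2 n) else p) := by
  intro ms
  induction ms with
  | nil => intro E _ _; simp
  | cons m ms ih =>
    intro E hnd hc
    have hcm : E.contains m = true := hc m List.mem_cons_self
    have hkeys : (pvDiscardOne E n m).keys = E.keys := by
      unfold pvDiscardOne
      cases hq : E.get? m with
      | none => rfl
      | some s => exact PySem.Dict.keys_insert_of_contains _ _ hcm
    simp only [List.foldl_cons]
    rw [ih (pvDiscardOne E n m) (by rw [hkeys]; exact hnd)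
        (fun m' hm' => by
          rw [PySem.Dict.contains_eq_decide_mem_keys, hkeys,
            ← PySem.Dict.contains_eq_decide_mem_keys]
          exact hc m' (List.mem_cons_of_mem _ hm'))]
    rw [discardOne_items E n m hnd hcm, List.map_map]
    refine List.map_congr_left (fun p hp => ?_)
    simp only [Function.comp]
    by_cases h1 : p.1 = m <;> by_cases h2 : p.1 ∈ ms <;>
      simp [h1, h2, List.mem_cons, discard_discard]

-- removing one leaf n from the restricted graph restricts to K minus n
theorem step_eq (L : List (Int × List Int)) (hnd : (L.map Prod.fst).Nodup)
    (hsym : ∀ p ∈ L, ∀ m ∈ p.2, ∃ q, q ∈ L ∧ q.1 = m ∧ p.1 ∈ q.2)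
    (hirr : ∀ p ∈ L, p.1 ∉ p.2)
    (K : List Int) (p0 : Int × List Int) (hp0 : p0 ∈ L) :
    ((p0.2.filter (fun m => decide (m ∈ K))).foldl
        (fun d' m => pvDiscardOne d' p0.1 m) ((PySem.Dict.mk (rstr L K)).erase p0.1)).items
      = rstr L (K.filter (fun x => !(x == p0.1))) := by
  have hirr0 : p0.1 ∉ p0.2 := hirr p0 hp0
  set n := p0.1 with hn
  set ms := p0.2.filter (fun m => decide (m ∈ K)) with hms
  set F : (Int × List Int) → Bool := fun p => decide (p.1 ∈ K) && !(p.1 == n) with hF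
  have hitems : ((PySem.Dict.mk (rstr L K)).erase n).items = (L.filter F).map (vmask K) := by
    simp only [PySem.Dict.erase, rstr, List.filter_map, List.filter_filter]
    congr 1
    refine List.filter_congr (fun p _ => ?_)
    simp [vmask, hF, Bool.and_comm]
  have hkeys : ((PySem.Dict.mk (rstr L K)).erase n).keys = (L.filter F).map Prod.fst := by
    rw [PySem.Dict.keys, hitems, List.map_map]
    rfl
  have hEnd : ((PySem.Dict.mk (rstr L K)).erase n).keys.Nodup := by
    rw [hkeys]
    exact List.Nodup.sublist (List.Sublist.map Prod.fst List.filter_sublist) hnd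
  have hcont : ∀ m ∈ ms, ((PySem.Dict.mk (rstr L K)).erase n).contains m = true := by
    intro m hm
    rw [hms, List.mem_filter] at hm
    obtain ⟨hm2, hmK⟩ := hm
    have hmK : m ∈ K := of_decide_eq_true hmK
    obtain ⟨q, hq, hq1, hqm⟩ := hsym p0 hp0 m hm2
    have hmn : ¬(m = n) := fun h => hirr0 (h ▸ hm2)
    have hqF : F q = true := by
      rw [hF]; simp [hq1, hmK, hmn]
    rw [PySem.Dict.contains_eq_decide_mem_keys, hkeys]
    simp only [decide_eq_true_eq, List.mem_map]
    exact ⟨q, List.mem_filter.mpr ⟨hq, hqF⟩, hq1⟩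
  rw [foldl_discard_items n ms _ hEnd hcont, hitems, List.map_map, rstr]
  have hfe : L.filter (fun p => decide (p.1 ∈ K.filter (fun x => !(x == n)))) = L.filter F := by
    refine List.filter_congr (fun p _ => ?_)
    simp [hF, List.mem_filter, beq_eq_decide_int]
  rw [hfe]
  refine List.map_congr_left (fun p hp => ?_)
  rw [List.mem_filter] at hp
  obtain ⟨hpL, hpF⟩ := hp
  have hpK : p.1 ∈ K := by
    rw [hF] at hpF; exact of_decide_eq_true (Bool.and_elim_left hpF)
  have hpn : ¬(p.1 = n) := by
    rw [hF] at hpF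
    have := Bool.and_elim_right hpF
    simpa using this
  by_cases hnp : n ∈ p.2
  · -- p is a neighbor of the removed leaf: its K-filtered set loses n
    obtain ⟨q, hq, hq1, hqm⟩ := hsym p hpL n hnp
    have hqp0 : q = p0 := entry_unique hnd hq hp0 (hq1.trans hn)
    have hin : p.1 ∈ ms := by
      rw [hms, List.mem_filter]
      exact ⟨hqp0 ▸ hqm, decide_eq_true hpK⟩
    simp only [Function.comp, vmask, hin, if_pos]
    refine Prod.ext rfl ?_
    simp only [PySem.Set.discard, List.filter_filter]
    refine (List.filter_congr (fun m _ => ?_)).symm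
    simp [List.mem_filter, Bool.and_comm, beq_eq_decide_int]
  · -- p is not adjacent to n: its entry is unchanged
    have hnin : p.1 ∉ ms := by
      intro hin
      rw [hms, List.mem_filter] at hin
      obtain ⟨q, hq, hq1, hqm⟩ := hsym p0 hp0 p.1 hin.1
      have : q = p := entry_unique hnd hq hpL hq1
      exact hnp (this ▸ hqm)
    simp only [Function.comp, vmask, hnin, if_neg, not_false_iff]
    refine Prod.ext rfl ?_
    refine (List.filter_congr (fun m hm => ?_)).symm
    have hmn : ¬(m = n) := fun h => hnp (h ▸ hm)
    simp [List.mem_filter, hmn, beq_eq_decide_int]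

-- A's loop computes the restriction to the unique maximal good set
theorem aloop_spec (L : List (Int × List Int)) (hnd : (L.map Prod.fst).Nodup)
    (hsym : ∀ p ∈ L, ∀ m ∈ p.2, ∃ q, q ∈ L ∧ q.1 = m ∧ p.1 ∈ q.2)
    (hirr : ∀ p ∈ L, p.1 ∉ p.2) :
    ∀ (fuel : Nat) (K : List Int), K.Sublist (L.map Prod.fst) →
      (∀ J, Good L J → ∀ x ∈ J, x ∈ K) → K.length ≤ fuel →
      ∃ K', K'.Sublist K ∧ Good L K' ∧ (∀ J, Good L J → ∀ x ∈ J, x ∈ K') ∧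
        (pvALoop fuel (PySem.Dict.mk (rstr L K))).items = rstr L K' := by
  intro fuel
  induction fuel with
  | zero =>
    intro K hK hmax hlen
    have hKnil : K = [] := List.eq_nil_of_length_eq_zero (Nat.le_zero.mp hlen)
    subst hKnil
    exact ⟨[], List.Sublist.refl _, (by intro n hn; cases hn), hmax, rfl⟩
  | succ fuel ih =>
    intro K hK hmax hlen
    cases hfind : (PySem.Dict.mk (rstr L K)).items.find? (fun p => decide (p.2.length ≤ 1)) with
    | none =>
      refine ⟨K, List.Sublist.refl _, ?_, hmax, ?_⟩
      · intro x hx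
        obtain ⟨p, hpL, hp1⟩ := List.mem_map.mp (hK.subset hx)
        have hmem : vmask K p ∈ rstr L K :=
          List.mem_map_of_mem (List.mem_filter.mpr ⟨hpL, decide_eq_true (hp1 ▸ hx)⟩)
        have hbig := List.find?_eq_none.mp hfind _ hmem
        refine ⟨p, hpL, hp1, ?_⟩
        simp only [vmask, decide_eq_true_eq, not_le] at hbig
        rw [List.countP_eq_length_filter]
        omega
      · show (pvALoop (fuel+1) (PySem.Dict.mk (rstr L K))).items = rstr L K
        simp only [pvALoop]
        rw [hfind]
    | some nm =>
      obtain ⟨n, msf⟩ := nm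
      have hmemf := List.mem_of_find?_eq_some hfind
      have hlef : msf.length ≤ 1 := by simpa using List.find?_some hfind
      obtain ⟨p0, hp0f, hvm⟩ := List.mem_map.mp hmemf
      rw [List.mem_filter] at hp0f
      obtain ⟨hp0L, hp0K'⟩ := hp0f
      have hp0K : p0.1 ∈ K := of_decide_eq_true hp0K'
      have hn : p0.1 = n := congrArg Prod.fst hvm
      have hms : msf = p0.2.filter (fun m => decide (m ∈ K)) := (congrArg Prod.snd hvm).symm
      have hmax' : ∀ J, Good L J → ∀ x ∈ J, x ∈ K.filter (fun x => !(x == n)) := by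
        intro J hJ x hx
        refine List.mem_filter.mpr ⟨hmax J hJ x hx, ?_⟩
        suffices hxn : ¬ (x = n) by simp [beq_eq_decide_int, hxn]
        rintro rfl
        obtain ⟨p, hpL, hp1, hcnt⟩ := hJ x hx
        have hpp0 : p = p0 := entry_unique hnd hpL hp0L (hp1.trans hn.symm)
        have hmono : p.2.countP (fun m => decide (m ∈ J)) ≤ p.2.countP (fun m => decide (m ∈ K)) :=
          List.countP_mono_left (fun a _ ha => decide_eq_true (hmax J hJ a (of_decide_eq_true ha)))
        have hsmall : p.2.countP (fun m => decide (m ∈ K)) ≤ 1 := by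
          rw [List.countP_eq_length_filter, hpp0, ← hms]
          exact hlef
        omega
      have hlt : (K.filter (fun x => !(x == n))).length < K.length := by
        refine List.length_filter_lt_length_iff_exists.mpr ⟨n, hn ▸ hp0K, by simp⟩
      obtain ⟨K'', h1, h2, h3, h4⟩ :=
        ih (K.filter (fun x => !(x == n)))
          (List.Sublist.trans List.filter_sublist hK) hmax' (by omega)
      refine ⟨K'', h1.trans List.filter_sublist, h2, h3, ?_⟩
      show (pvALoop (fuel+1) (PySem.Dict.mk (rstr L K))).items = rstr L K''
      simp only [pvALoop]
      rw [hfind]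
      dsimp only
      have hd : (msf.foldl (fun d' m => pvDiscardOne d' n m) ((PySem.Dict.mk (rstr L K)).erase n))
          = PySem.Dict.mk (rstr L (K.filter (fun x => !(x == n)))) := by
        apply PySem.Dict.ext
        rw [hms, ← hn]
        exact step_eq L hnd hsym hirr K p0 hp0L
      rw [hd]
      exact h4

-- counting kept neighbours through the dict lookup = counting them in the entry
theorem cnt_eq (L : List (Int × List Int)) (hnd : (L.map Prod.fst).Nodup)
    (adj : PySem.Dict Int (List Int)) (hadj : adj.items = L)
    (kp : List Int) (p : Int × List Int) (hp : p ∈ L) :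
    (adj.getD p.1 []).countP (fun m => PySem.Set.contains kp m)
      = p.2.countP (fun m => decide (m ∈ kp)) := by
  have hka : adj.keys.Nodup := by rw [PySem.Dict.keys, hadj]; exact hnd
  have hg : adj.getD p.1 [] = p.2 :=
    PySem.Dict.getD_of_mem_items adj (k := p.1) (v := p.2) (by rw [hadj]; exact hp) hka []
  rw [hg]
  refine List.countP_congr (fun m _ => ?_)
  rw [PySem.Set.contains_eq_listContains, contains_eq_decide_mem]

-- B's fixpoint loop computes the same unique maximal good set
theorem bloop_spec (L : List (Int × List Int)) (hnd : (L.map Prod.fst).Nodup)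
    (adj : PySem.Dict Int (List Int)) (hadj : adj.items = L) :
    ∀ (fuel : Nat) (keep : List Int), keep.Sublist (L.map Prod.fst) →
      (∀ J, Good L J → ∀ x ∈ J, x ∈ keep) → keep.length < fuel →
      (pvBLoop fuel adj keep).Sublist (L.map Prod.fst) ∧ Good L (pvBLoop fuel adj keep) ∧
        (∀ J, Good L J → ∀ x ∈ J, x ∈ pvBLoop fuel adj keep) := by
  have hcontkey : ∀ n, n ∈ L.map Prod.fst → adj.contains n = true := by
    intro n hn
    rw [PySem.Dict.contains_eq_decide_mem_keys, PySem.Dict.keys, hadj]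
    exact decide_eq_true hn
  intro fuel
  induction fuel with
  | zero => intro keep _ _ h; omega
  | succ fuel ih =>
    intro keep hsub hmax hlen
    set pred : Int → Bool := fun n =>
      !(adj.contains n) || decide (1 < (adj.getD n []).countP (fun m => PySem.Set.contains keep m))
      with hpred
    by_cases heq : PySem.Set.equal (keep.filter pred) keep = true
    · have hres : pvBLoop (fuel+1) adj keep = keep := by
        simp only [pvBLoop]
        rw [← hpred, if_pos heq]
      rw [hres]
      refine ⟨hsub, ?_, hmax⟩
      intro x hx
      have hss : PySem.Set.issubset keep (keep.filter pred) = true := by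
        rw [PySem.Set.equal] at heq
        exact (Bool.and_eq_true_iff.mp heq).2
      have hxnw := (PySem.Set.issubset_iff _ _).mp hss x hx
      obtain ⟨p, hpL, hp1⟩ := List.mem_map.mp (hsub.subset hx)
      have hpx : pred x = true := (List.mem_filter.mp hxnw).2
      rw [hpred] at hpx
      simp only [hcontkey x (hsub.subset hx), Bool.not_true, Bool.false_or,
        decide_eq_true_eq] at hpx
      rw [← hp1, cnt_eq L hnd adj hadj keep p hpL] at hpx
      exact ⟨p, hpL, hp1, by omega⟩
    · have hres : pvBLoop (fuel+1) adj keep = pvBLoop fuel adj (keep.filter pred) := by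
        simp only [pvBLoop]
        rw [← hpred, if_neg heq]
      rw [hres]
      apply ih
      · exact List.Sublist.trans List.filter_sublist hsub
      · intro J hJ x hx
        refine List.mem_filter.mpr ⟨hmax J hJ x hx, ?_⟩
        obtain ⟨p, hpL, hp1, hcnt⟩ := hJ x hx
        have hmono : p.2.countP (fun m => decide (m ∈ J)) ≤ p.2.countP (fun m => decide (m ∈ keep)) :=
          List.countP_mono_left (fun a _ ha => decide_eq_true (hmax J hJ a (of_decide_eq_true ha)))
        rw [hpred]
        refine Bool.or_eq_true_iff.mpr (Or.inr (decide_eq_true ?_))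
        rw [← hp1, cnt_eq L hnd adj hadj keep p hpL]
        omega
      · rcases Nat.lt_or_ge (keep.filter pred).length keep.length with h | h
        · omega
        · exfalso
          have hfe : keep.filter pred = keep :=
            List.Sublist.eq_of_length List.filter_sublist
              (Nat.le_antisymm (List.Sublist.length_le List.filter_sublist) h)
          rw [hfe] at heq
          exact heq (by simp [PySem.Set.equal, PySem.Set.issubset_iff])

-- membership in keep = set(adj); for ms in adj.values(): keep |= ms
theorem mem_foldl_union (y : Int) : ∀ (l : List (List Int)) (s : PySem.Set Int),
    (y ∈ l.foldl (fun k ms => PySem.Set.union k ms) s ↔ y ∈ s ∨ ∃ t ∈ l, y ∈ t) := by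
  intro l
  induction l with
  | nil => intro s; simp
  | cons t l ih =>
    intro s
    simp only [List.foldl_cons]
    rw [ih (PySem.Set.union s t)]
    simp only [PySem.Set.mem_union]
    constructor
    · rintro ((h | h) | ⟨u, hu, hy⟩)
      · exact Or.inl h
      · exact Or.inr ⟨t, List.mem_cons_self, h⟩
      · exact Or.inr ⟨u, List.mem_cons_of_mem _ hu, hy⟩
    · rintro (h | ⟨u, hu, hy⟩)
      · exact Or.inl (Or.inl h)
      · rcases List.mem_cons.mp hu with rfl | hu
        · exact Or.inl (Or.inr hy)
        · exact Or.inr ⟨u, hu, hy⟩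

-- when every neighbour already has an entry, the unions add nothing
theorem foldl_union_eq_self : ∀ (l : List (List Int)) (s : PySem.Set Int),
    (∀ t ∈ l, ∀ x ∈ t, x ∈ s) → l.foldl (fun k ms => PySem.Set.union k ms) s = s := by
  intro l
  induction l with
  | nil => intro s _; rfl
  | cons t l ih =>
    intro s h
    simp only [List.foldl_cons]
    have hu : PySem.Set.union s t = s := by
      rw [PySem.Set.union, PySem.Set.update_eq_append_filter]
      have : (PySem.Set.ofList t).filter (fun y => !(PySem.Set.contains s y)) = [] := by
        refine List.filter_eq_nil_iff.mpr (fun y hy => ?_)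
        have : y ∈ s := h t List.mem_cons_self y ((PySem.Set.mem_ofList _ _).mp hy)
        simp [PySem.Set.contains_eq_listContains, this]
      rw [this, List.append_nil]
    rw [hu]
    exact ih s (fun u hu x hx => h u (List.mem_cons_of_mem _ hu) x hx)

-- properties of the cleaned adjacency under Pre_
theorem clean_nodup (bonds : List (Int × List Int)) :
    ((pvClean bonds).items.map Prod.fst).Nodup := by
  have h1 : (pvClean bonds).items.map Prod.fst
      = ((PySem.Dict.ofList bonds).items.filter (fun p => !p.2.isEmpty)).map Prod.fst := by
    simp only [pvClean, List.map_map]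
    rfl
  rw [h1]
  have h2 := PySem.Dict.nodup_keys_ofList bonds
  rw [PySem.Dict.keys] at h2
  exact List.Nodup.sublist (List.Sublist.map _ List.filter_sublist) h2

theorem clean_sym (bonds : List (Int × List Int))
    (hpre : ∀ p ∈ (PySem.Dict.ofList bonds).items, p.2 ≠ [] →
      p.1 ∉ p.2 ∧ ∀ m ∈ p.2, p.1 ∈ (PySem.Dict.ofList bonds).getD m []) :
    ∀ p ∈ (pvClean bonds).items, ∀ m ∈ p.2,
      ∃ q, q ∈ (pvClean bonds).items ∧ q.1 = m ∧ p.1 ∈ q.2 := by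
  intro p hp m hm
  simp only [pvClean] at hp
  obtain ⟨q, hq, rfl⟩ := List.mem_map.mp hp
  rw [List.mem_filter] at hq
  have hne : q.2 ≠ [] := by simpa using hq.2
  have hm' : m ∈ q.2 := (PySem.Set.mem_ofList _ _).mp hm
  have hmem := (hpre q hq.1 hne).2 m hm'
  rw [PySem.Dict.getD_eq_get?_getD] at hmem
  cases hg : (PySem.Dict.ofList bonds).get? m with
  | none => rw [hg] at hmem; cases hmem
  | some s =>
    rw [hg] at hmem
    have hs : (m, s) ∈ (PySem.Dict.ofList bonds).items :=
      PySem.Dict.mem_items_of_get?_eq_some _ hg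
    have hsne : ¬s.isEmpty := by
      cases s with
      | nil => cases hmem
      | cons a t => simp
    refine ⟨(m, PySem.Set.ofList s), ?_, rfl, ?_⟩
    · simp only [pvClean]
      exact List.mem_map.mpr ⟨(m, s), List.mem_filter.mpr ⟨hs, by simpa using hsne⟩, rfl⟩
    · exact (PySem.Set.mem_ofList _ _).mpr hmem

theorem clean_irr (bonds : List (Int × List Int))
    (hpre : ∀ p ∈ (PySem.Dict.ofList bonds).items, p.2 ≠ [] →
      p.1 ∉ p.2 ∧ ∀ m ∈ p.2, p.1 ∈ (PySem.Dict.ofList bonds).getD m []) :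
    ∀ p ∈ (pvClean bonds).items, p.1 ∉ p.2 := by
  intro p hp
  simp only [pvClean] at hp
  obtain ⟨q, hq, rfl⟩ := List.mem_map.mp hp
  rw [List.mem_filter] at hq
  have hne : q.2 ≠ [] := by simpa using hq.2
  have := (hpre q hq.1 hne).1
  simpa [PySem.Set.mem_ofList] using this

theorem rstr_keys (L : List (Int × List Int))
    (hsym : ∀ p ∈ L, ∀ m ∈ p.2, ∃ q, q ∈ L ∧ q.1 = m ∧ p.1 ∈ q.2) :
    rstr L (L.map Prod.fst) = L := by
  rw [rstr]
  have h1 : L.filter (fun p => decide (p.1 ∈ L.map Prod.fst)) = L :=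
    List.filter_eq_self.mpr (fun p hp => decide_eq_true (List.mem_map.mpr ⟨p, hp, rfl⟩))
  rw [h1]
  have h2 : ∀ p ∈ L, vmask (L.map Prod.fst) p = p := by
    intro p hp
    rw [vmask]
    refine Prod.ext rfl ?_
    refine List.filter_eq_self.mpr (fun m hm => decide_eq_true ?_)
    obtain ⟨q, hq, hq1, -⟩ := hsym p hp m hm
    exact List.mem_map.mpr ⟨q, hq, hq1⟩
  exact (List.map_congr_left h2).trans (List.map_id _)

theorem aloop_id (fuel : Nat) (d : PySem.Dict Int (List Int))
    (h : d.items.find? (fun p => decide (p.2.length ≤ 1)) = none) : pvALoop fuel d = d := by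
  cases fuel with
  | zero => rfl
  | succ f =>
    simp only [pvALoop]
    rw [h]

theorem equal_refl (s : PySem.Set Int) : PySem.Set.equal s s = true := by
  simp [PySem.Set.equal, PySem.Set.issubset_iff]

-- ===== VERDICT (by name: the statement is the Claim_ definition above) =====
theorem skin_graph_py_spec : Claim_equal_skin_graph_py := by
  intro bonds _ hpre
  set L := (pvClean bonds).items with hL
  have hnd := clean_nodup bonds
  have hkeys : (pvClean bonds).keys = L.map Prod.fst := rfl
  rcases hpre with hpre | hC0
  · -- symmetric simple graph: both sides compute the restriction to the maximal good set
    have hsym := clean_sym bonds hpre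
    have hirr := clean_irr bonds hpre
    have hmk : pvClean bonds = PySem.Dict.mk (rstr L (L.map Prod.fst)) := by
      apply PySem.Dict.ext
      rw [rstr_keys L hsym]
    -- the union loop adds nothing: every neighbour already owns an entry
    have hall : pvAllNodes (pvClean bonds) = (pvClean bonds).keys := by
      rw [pvAllNodes]
      refine foldl_union_eq_self _ _ (fun t ht x hx => ?_)
      obtain ⟨p, hp, hp2⟩ := List.mem_map.mp ht
      obtain ⟨q, hq, hq1, -⟩ := hsym p hp x (hp2 ▸ hx)
      rw [hkeys]
      exact List.mem_map.mpr ⟨q, hq, hq1⟩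
    obtain ⟨KA, hKA1, hKA2, hKA3, hKA4⟩ :=
      aloop_spec L hnd hsym hirr L.length (L.map Prod.fst) (List.Sublist.refl _)
        (fun J hJ x hx => good_subset_keys hJ x hx) (by rw [List.length_map])
    rw [← hmk] at hKA4
    obtain ⟨hB1, hB2, hB3⟩ :=
      bloop_spec L hnd (pvClean bonds) rfl ((pvAllNodes (pvClean bonds)).length + 1)
        (pvAllNodes (pvClean bonds))
        (by rw [hall, hkeys]) (fun J hJ x hx => by rw [hall, hkeys]; exact good_subset_keys hJ x hx)
        (by omega)
    set KB := pvBLoop ((pvAllNodes (pvClean bonds)).length + 1) (pvClean bonds)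
      (pvAllNodes (pvClean bonds)) with hKB
    have hKAKB : KA = KB := by
      refine sublist_eq_of_mem_iff (hKA1.trans (List.Sublist.refl _)) hB1 hnd (fun x => ⟨?_, ?_⟩)
      · exact fun hx => hB3 KA hKA2 x hx
      · exact fun hx => hKA3 _ hB2 x hx
    show skin_graph_py bonds = skin_graph_py_alt bonds
    have hAfinal : skin_graph_py bonds = rstr L KA := hKA4
    have hBfinal : skin_graph_py_alt bonds = rstr L KB := by
      simp only [skin_graph_py_alt, rstr, ← hKB]
      have hf : L.filter (fun p => PySem.Set.contains KB p.1)
          = L.filter (fun p => decide (p.1 ∈ KB)) := by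
        refine List.filter_congr (fun p _ => ?_)
        rw [PySem.Set.contains_eq_listContains, contains_eq_decide_mem]
      rw [hf]
      refine List.map_congr_left (fun p hp => ?_)
      rw [vmask]
      refine Prod.ext rfl ?_
      refine List.filter_congr (fun m _ => ?_)
      rw [PySem.Set.contains_eq_listContains, contains_eq_decide_mem]
    rw [hAfinal, hBfinal, hKAKB]
  · -- every nonempty entry already has two distinct neighbors: neither loop changes anything
    have h2 : ∀ p ∈ L, 2 ≤ p.2.length := by
      intro p hp
      simp only [hL, pvClean] at hp
      obtain ⟨q, hq, rfl⟩ := List.mem_map.mp hp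
      rw [List.mem_filter] at hq
      exact hC0 q hq.1 (by simpa using hq.2)
    have hfind : L.find? (fun p => decide (p.2.length ≤ 1)) = none :=
      List.find?_eq_none.mpr (fun p hp => by have := h2 p hp; simp; omega)
    -- every key and every neighbour is in the initial keep set
    have hmemAll : ∀ x, x ∈ pvAllNodes (pvClean bonds)
        ↔ x ∈ (pvClean bonds).keys ∨ ∃ t ∈ (pvClean bonds).values, x ∈ t := by
      intro x
      rw [pvAllNodes]
      exact mem_foldl_union x (pvClean bonds).values (pvClean bonds).keys
    have hkeyAll : ∀ x ∈ L.map Prod.fst, x ∈ pvAllNodes (pvClean bonds) := by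
      intro x hx
      exact (hmemAll x).mpr (Or.inl (hkeys ▸ hx))
    have hnbrAll : ∀ p ∈ L, ∀ m ∈ p.2, m ∈ pvAllNodes (pvClean bonds) := by
      intro p hp m hm
      refine (hmemAll m).mpr (Or.inr ⟨p.2, ?_, hm⟩)
      exact List.mem_map.mpr ⟨p, hp, rfl⟩
    -- the first fixpoint iteration keeps everything, so the loop exits at once
    have hnw : (pvAllNodes (pvClean bonds)).filter (fun n =>
        !((pvClean bonds).contains n)
          || decide (1 < ((pvClean bonds).getD n []).countP
               (fun m => (pvAllNodes (pvClean bonds)).contains m)))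
        = pvAllNodes (pvClean bonds) := by
      refine List.filter_eq_self.mpr (fun n hn => ?_)
      by_cases hc : (pvClean bonds).contains n = true
      · rw [hc]
        refine Bool.or_eq_true_iff.mpr (Or.inr (decide_eq_true ?_))
        have hnk : n ∈ L.map Prod.fst := by
          rw [← hkeys]
          have h' := hc
          rw [PySem.Dict.contains_eq_decide_mem_keys] at h'
          exact of_decide_eq_true h'
        obtain ⟨p, hp, hp1⟩ := List.mem_map.mp hnk
        rw [← hp1, cnt_eq L hnd (pvClean bonds) rfl _ p hp]
        have hcall : p.2.countP (fun m => decide (m ∈ pvAllNodes (pvClean bonds))) = p.2.length :=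
          List.countP_eq_length.mpr (fun m hm => decide_eq_true (hnbrAll p hp m hm))
        have := h2 p hp
        omega
      · rw [Bool.not_eq_true] at hc
        rw [hc]
        rfl
    have hBloop : pvBLoop ((pvAllNodes (pvClean bonds)).length + 1) (pvClean bonds)
        (pvAllNodes (pvClean bonds)) = pvAllNodes (pvClean bonds) := by
      simp only [pvBLoop]
      rw [hnw, if_pos (equal_refl _)]
    show skin_graph_py bonds = skin_graph_py_alt bonds
    have hAfinal : skin_graph_py bonds = L := by
      rw [skin_graph_py]
      rw [aloop_id _ _ hfind]
    have hBfinal : skin_graph_py_alt bonds = L := by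
      simp only [skin_graph_py_alt]
      rw [hBloop]
      have hf : L.filter (fun p => PySem.Set.contains (pvAllNodes (pvClean bonds)) p.1) = L := by
        refine List.filter_eq_self.mpr (fun p hp => ?_)
        rw [PySem.Set.contains_eq_listContains, contains_eq_decide_mem]
        exact decide_eq_true (hkeyAll p.1 (List.mem_map.mpr ⟨p, hp, rfl⟩))
      rw [hf]
      have hv : ∀ p ∈ L, (p.1, p.2.filter
          (fun m => PySem.Set.contains (pvAllNodes (pvClean bonds)) m)) = p := by
        intro p hp
        refine Prod.ext rfl ?_
        refine List.filter_eq_self.mpr (fun m hm => ?_)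
        rw [PySem.Set.contains_eq_listContains, contains_eq_decide_mem]
        exact decide_eq_true (hnbrAll p hp m hm)
      exact (List.map_congr_left hv).trans (List.map_id _)
    rw [hAfinal, hBfinal]
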